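-- pv_equiv track=rewrite | github.com/axocomm/lambda.codes | app.py | find_title
-- ===== SOURCE A (Python) =====
-- def find_title(content):
--     """Try to find a page title using the first h1 in the Markdown
--     source.
--     """
--     lines = content.split('\n')
--     matches = [
--         line for line in lines
--         if line.startswith('# ')
--     ]
--
--     if not matches:
--         return None
--     else:
--         return matches[0].lstrip('# ')
-- ===== SOURCE B (Python) =====
-- def find_title(content):
--     """Try to find a page title using the first h1 in the Markdown
--     source.
--     """
--     remaining = content
--     while True:
--         line, sep, remaining = remaining.partition('\n')
--         if line.startswith('# '):
--             return line.lstrip('# ')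
--         if not sep:
--             return None
-- ===== Notes on version B (the rewrite author's own statement) =====
-- stated objective: alternative
-- what changed: B streams through the text with str.partition, examining one line at a time and returning at the first heading line, instead of materializing the full list of lines and a filtered list of all matching lines.
import Mathlib
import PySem

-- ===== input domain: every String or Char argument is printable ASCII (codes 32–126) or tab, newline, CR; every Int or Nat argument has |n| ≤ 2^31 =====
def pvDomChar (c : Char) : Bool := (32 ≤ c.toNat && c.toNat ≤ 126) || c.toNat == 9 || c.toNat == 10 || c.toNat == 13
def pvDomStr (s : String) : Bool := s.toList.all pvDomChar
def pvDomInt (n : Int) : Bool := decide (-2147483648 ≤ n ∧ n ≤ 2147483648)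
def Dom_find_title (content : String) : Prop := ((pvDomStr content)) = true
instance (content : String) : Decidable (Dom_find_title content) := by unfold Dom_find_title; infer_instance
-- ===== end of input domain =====

-- B streams through the text with str.partition, returning at the first '# ' line, instead of
-- materializing the full list of lines and a filtered list of matches (objective: alternative).

-- line.lstrip('# '): drop leading characters belonging to {'#', ' '} — exact port of str.lstrip with a char set.
def pvLstripHashSpace (l : List Char) : List Char :=
  l.dropWhile (fun c => c == '#' || c == ' ')

-- ===== PORT A =====
def find_title (content : String) : Option String :=
  -- lines = content.split('\n')  (separator is the non-empty literal '\n', so split never raises)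
  let lines := PySem.Chars.splitOn content.toList ['\n']
  -- matches = [line for line in lines if line.startswith('# ')]
  let ms := lines.filter (fun l => PySem.Chars.startswith l ['#', ' '])
  match ms with
  | [] => none
  | m :: _ => some (String.ofList (pvLstripHashSpace m))

-- ===== PORT B =====
-- the while loop of Source B as structural recursion on the remaining characters;
-- remaining.partition('\n') = (line, sep, after) with line = takeWhile (≠ '\n') and
-- sep ++ after = dropWhile (≠ '\n') — exact for the single-character separator '\n'
-- (sep = '' exactly when the dropWhile part is empty).
def find_title_alt_go (cs : List Char) : Option (List Char) :=
  let line := cs.takeWhile (fun c => c != '\n')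
  let rest := cs.dropWhile (fun c => c != '\n')
  if PySem.Chars.startswith line ['#', ' '] then
    some (pvLstripHashSpace line)
  else if hr : rest = [] then
    none
  else
    find_title_alt_go rest.tail
termination_by cs.length
decreasing_by
  have h1 : (cs.dropWhile (fun c => c != '\n')).length ≤ cs.length := List.length_dropWhile_le _ _
  have h2 : 0 < (cs.dropWhile (fun c => c != '\n')).length := List.length_pos_of_ne_nil hr
  simp only [List.length_tail]
  omega

def find_title_alt (content : String) : Option String :=
  (find_title_alt_go content.toList).map String.ofList

-- ===== PRECONDITION & SPEC =====
def Spec_find_title (content : String) (out : Option String) : Prop := out = find_title_alt content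
instance (content : String) (out : Option String) : Decidable (Spec_find_title content out) := by unfold Spec_find_title; infer_instance

-- ===== CLAIM (what is proved, stated in full; the proofs are below) =====
def Claim_equal_find_title : Prop := ∀ (content : String), Dom_find_title content → Spec_find_title content (find_title content)

-- ===== LEMMAS AND PROOFS =====

-- structural characterization of content.split('\n'): one line, then the lines of what follows the first '\n'
def pvLines (cs : List Char) : List (List Char) :=
  let rest := cs.dropWhile (fun c => c != '\n')
  if hr : rest = [] then [cs.takeWhile (fun c => c != '\n')]
  else cs.takeWhile (fun c => c != '\n') :: pvLines rest.tail
termination_by cs.length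
decreasing_by
  have h1 : (cs.dropWhile (fun c => c != '\n')).length ≤ cs.length := List.length_dropWhile_le _ _
  have h2 : 0 < (cs.dropWhile (fun c => c != '\n')).length := List.length_pos_of_ne_nil hr
  simp only [List.length_tail]
  omega

lemma pvLines_head (cs : List Char) :
    ∃ t, pvLines cs = cs.takeWhile (fun c => c != '\n') :: t := by
  rw [pvLines]
  split <;> exact ⟨_, rfl⟩

lemma pvLines_cons_newline (rest : List Char) :
    pvLines ('\n' :: rest) = [] :: pvLines rest := by
  rw [pvLines]
  have hd : ('\n' :: rest).dropWhile (fun c => c != '\n') = '\n' :: rest := by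
    simp [List.dropWhile]
  have ht : ('\n' :: rest).takeWhile (fun c => c != '\n') = [] := by
    simp [List.takeWhile]
  simp only [hd, ht]
  simp

lemma pvLines_tail (cs : List Char) :
    (pvLines cs).tail =
      if cs.dropWhile (fun c => c != '\n') = [] then []
      else pvLines (cs.dropWhile (fun c => c != '\n')).tail := by
  rw [pvLines]
  split <;> simp_all

lemma pvLines_cons_other (c : Char) (rest : List Char) (hc : c ≠ '\n') :
    pvLines (c :: rest) =
      (c :: rest.takeWhile (fun c => c != '\n')) :: (pvLines rest).tail := by
  have hcb : (c != '\n') = true := by simp [hc]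
  have hd : (c :: rest).dropWhile (fun c => c != '\n') = rest.dropWhile (fun c => c != '\n') := by
    simp [List.dropWhile, hcb]
  have ht : (c :: rest).takeWhile (fun c => c != '\n') = c :: rest.takeWhile (fun c => c != '\n') := by
    simp [List.takeWhile, hcb]
  conv_lhs => rw [pvLines]
  rw [pvLines_tail rest]
  simp only [hd, ht]
  split <;> simp_all

lemma splitOn_go_spec :
    ∀ (fuel : Nat) (l cur : List Char) (acc : List (List Char)), l.length < fuel →
      PySem.Chars.splitOn.go ['\n'] fuel l cur acc =
        acc.reverse ++ (cur.reverse ++ l.takeWhile (fun c => c != '\n')) :: (pvLines l).tail := by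
  intro fuel
  induction fuel with
  | zero => intro l cur acc h; omega
  | succ n ih =>
    intro l cur acc h
    match l with
    | [] =>
      rw [pvLines]
      simp [PySem.Chars.splitOn.go]
    | c :: rest =>
      by_cases hc : c = '\n'
      · subst hc
        have hpre : List.isPrefixOf ['\n'] ('\n' :: rest) = true := by simp [List.isPrefixOf]
        rw [PySem.Chars.splitOn.go]
        simp only [hpre, if_pos]
        have hlt : rest.length < n := by simp at h; omega
        rw [show List.drop (['\n'] : List Char).length ('\n' :: rest) = rest by simp]
        rw [ih rest [] (cur.reverse :: acc) hlt]
        rw [pvLines_cons_newline]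
        rcases pvLines_head rest with ⟨t, htl⟩
        rw [htl]
        simp [List.takeWhile]
      · have hcb : (c != '\n') = true := by simp [hc]
        have hpre : List.isPrefixOf ['\n'] (c :: rest) = false := by
          simp [List.isPrefixOf]; intro hcc; exact absurd hcc.symm hc
        rw [PySem.Chars.splitOn.go]
        rw [if_neg (by simp [hpre])]
        have hlt : rest.length < n := by simp at h; omega
        rw [ih rest (c :: cur) acc hlt]
        rw [pvLines_cons_other c rest hc]
        have ht : (c :: rest).takeWhile (fun c => c != '\n') = c :: rest.takeWhile (fun c => c != '\n') := by
          simp [List.takeWhile, hcb]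
        rw [ht]
        simp

lemma splitOn_eq_pvLines (cs : List Char) :
    PySem.Chars.splitOn cs ['\n'] = pvLines cs := by
  rw [PySem.Chars.splitOn, splitOn_go_spec (cs.length + 1) cs [] [] (by omega)]
  rcases pvLines_head cs with ⟨t, ht⟩
  rw [ht]
  simp

lemma core_eq (cs : List Char) :
    (match (pvLines cs).filter (fun l => PySem.Chars.startswith l ['#', ' ']) with
     | [] => (none : Option (List Char))
     | m :: _ => some (pvLstripHashSpace m)) = find_title_alt_go cs := by
  induction cs using pvLines.induct with
  | case1 cs rest hr =>
    have hr' : List.dropWhile (fun c => c != '\n') cs = [] := hr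
    rw [pvLines, find_title_alt_go, dif_pos hr', dif_pos hr']
    by_cases hp : PySem.Chars.startswith (cs.takeWhile (fun c => c != '\n')) ['#', ' '] = true
    · simp [hp]
    · simp [List.filter, hp]
  | case2 cs rest hr ih =>
    have hr' : ¬ List.dropWhile (fun c => c != '\n') cs = [] := hr
    rw [pvLines, find_title_alt_go, dif_neg hr', dif_neg hr']
    by_cases hp : PySem.Chars.startswith (cs.takeWhile (fun c => c != '\n')) ['#', ' '] = true
    · simp [hp]
    · simp only [List.filter_cons, Bool.of_not_eq_true hp, Bool.false_eq_true, if_false]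
      exact ih

-- ===== VERDICT (by name: the statement is the Claim_ definition above) =====
theorem find_title_spec : Claim_equal_find_title := by
  intro content _
  unfold Spec_find_title find_title find_title_alt
  rw [splitOn_eq_pvLines]
  rw [← core_eq content.toList]
  cases h : (pvLines content.toList).filter (fun l => PySem.Chars.startswith l ['#', ' ']) <;> simp [h]
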